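-- pv_equiv track=rewrite | github.com/weiyangzen/awesome_algorithms | Algorithms/计算机-排序算法-0004-插入排序_(Insertion_Sort)/demo.py | check_stability
-- ===== SOURCE A (Python) =====
-- from typing import Callable, List, Sequence, Tuple, TypeVar
--
-- def check_stability(sorted_records: Sequence[Tuple[int, int]]) -> bool:
--     """For equal values, original indices must stay non-decreasing."""
--     groups: dict[int, List[int]] = {}
--     for value, original_idx in sorted_records:
--         groups.setdefault(value, []).append(original_idx)
--     return all(
--         all(indices[i] <= indices[i + 1] for i in range(len(indices) - 1))
--         for indices in groups.values()
--     )
-- ===== SOURCE B (Python) =====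
-- def check_stability(sorted_records):
--     """For equal values, original indices must stay non-decreasing."""
--     last = {}
--     for value, original_idx in sorted_records:
--         if value in last and original_idx < last[value]:
--             return False
--         last[value] = original_idx
--     return True
-- ===== Notes on version B (the rewrite author's own statement) =====
-- stated objective: simpler
-- what changed: Replaces the two-phase build-all-groups-then-scan-each-group algorithm with a single fused pass that keeps only the last-seen original index per value and returns False early at the first inversion.
import Mathlib
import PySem

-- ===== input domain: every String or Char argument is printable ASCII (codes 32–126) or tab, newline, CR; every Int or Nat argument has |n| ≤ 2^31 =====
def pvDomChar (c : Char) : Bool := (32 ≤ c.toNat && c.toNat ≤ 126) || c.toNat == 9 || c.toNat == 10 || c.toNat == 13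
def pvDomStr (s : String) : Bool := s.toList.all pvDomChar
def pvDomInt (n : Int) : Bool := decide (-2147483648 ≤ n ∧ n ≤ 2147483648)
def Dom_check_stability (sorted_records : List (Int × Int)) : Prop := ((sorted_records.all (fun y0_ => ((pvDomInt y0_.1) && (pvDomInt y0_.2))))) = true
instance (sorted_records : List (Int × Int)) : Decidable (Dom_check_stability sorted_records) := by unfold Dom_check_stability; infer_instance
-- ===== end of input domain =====

-- B replaces A's build-all-groups-then-scan-each-group structure with one fused pass keeping
-- only the last-seen original index per value (objective: simpler; return value proved equal).

-- ===== PORT A =====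
def check_stability (sorted_records : List (Int × Int)) : Bool :=
  let groups : PySem.Dict Int (List Int) :=
    sorted_records.foldl (fun d p => d.modify p.1 [] (fun l => l ++ [p.2])) PySem.Dict.empty
  groups.values.all (fun indices =>
    (PySem.List.pyRange 0 ((indices.length : Int) - 1) 1).all (fun i =>
      decide (PySem.List.pyGetD indices i 0 ≤ PySem.List.pyGetD indices (i + 1) 0)))

-- ===== PORT B =====
def checkStabilityGo (last : PySem.Dict Int Int) : List (Int × Int) → Bool
  | [] => true
  | (value, original_idx) :: rest =>
    if last.contains value && decide (original_idx < last.getD value 0) then false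
    else checkStabilityGo (last.insert value original_idx) rest

def check_stability_alt (sorted_records : List (Int × Int)) : Bool :=
  checkStabilityGo PySem.Dict.empty sorted_records

-- ===== PRECONDITION & SPEC =====
def Spec_check_stability (sorted_records : List (Int × Int)) (out : Bool) : Prop := out = check_stability_alt sorted_records
instance (sorted_records : List (Int × Int)) (out : Bool) : Decidable (Spec_check_stability sorted_records out) := by unfold Spec_check_stability; infer_instance

-- ===== CLAIM (what is proved, stated in full; the proofs are below) =====
def Claim_equal_check_stability : Prop := ∀ (sorted_records : List (Int × Int)), Dom_check_stability sorted_records → Spec_check_stability sorted_records (check_stability sorted_records)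

-- ===== LEMMAS AND PROOFS =====

-- the indices, in input order, of the records whose value is v
def pvIdxs (v : Int) (xs : List (Int × Int)) : List Int :=
  (xs.filter (fun p => p.1 == v)).map (·.2)

-- B's running check as a function of the optional "last seen" index
def pvChain : Option Int → List Int → Bool
  | _, [] => true
  | none, i :: rest => pvChain (some i) rest
  | some j, i :: rest => decide (j ≤ i) && pvChain (some i) rest

theorem pvChain_some_iff (l : List Int) : ∀ j, pvChain (some j) l = true ↔ List.IsChain (· ≤ ·) (j :: l) := by
  induction l with
  | nil => intro j; simp [pvChain]
  | cons i rest ih => intro j; simp [pvChain, ih, List.isChain_cons_cons]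

theorem pvChain_none_iff (l : List Int) : pvChain none l = true ↔ List.IsChain (· ≤ ·) l := by
  cases l with
  | nil => simp [pvChain]
  | cons i rest => simp [pvChain, pvChain_some_iff]

theorem pvIdxs_cons_self (v i : Int) (xs : List (Int × Int)) :
    pvIdxs v ((v, i) :: xs) = i :: pvIdxs v xs := by
  simp [pvIdxs]

theorem pvIdxs_cons_ne {w v : Int} (i : Int) (xs : List (Int × Int)) (h : w ≠ v) :
    pvIdxs v ((w, i) :: xs) = pvIdxs v xs := by
  simp [pvIdxs, h]

theorem pvIdxs_of_not_mem (v : Int) (xs : List (Int × Int)) (h : v ∉ xs.map (·.1)) :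
    pvIdxs v xs = [] := by
  unfold pvIdxs
  rw [List.filter_eq_nil_iff.mpr, List.map_nil]
  intro p hp hbeq
  exact h (List.mem_map.mpr ⟨p, hp, by simpa using hbeq⟩)

-- B's loop, generalized over the accumulator
theorem checkStabilityGo_eq (xs : List (Int × Int)) : ∀ last : PySem.Dict Int Int,
    checkStabilityGo last xs = true ↔
      ∀ v : Int, pvChain (last.get? v) (pvIdxs v xs) = true := by
  induction xs with
  | nil =>
    intro last
    constructor
    · intro _ v; simp [pvIdxs, pvChain]
    · intro _; simp [checkStabilityGo]
  | cons p rest ih =>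
    intro last
    obtain ⟨v0, i0⟩ := p
    simp only [checkStabilityGo]
    by_cases hbad : last.contains v0 && decide (i0 < last.getD v0 0)
    · rw [if_pos hbad]
      simp only [Bool.and_eq_true, decide_eq_true_eq] at hbad
      obtain ⟨hc, hlt⟩ := hbad
      have hsome : ∃ j, last.get? v0 = some j := by
        have := PySem.Dict.contains_eq_isSome_get? last v0
        rw [hc] at this
        exact Option.isSome_iff_exists.mp this.symm
      obtain ⟨j, hj⟩ := hsome
      have hji : i0 < j := by
        have := PySem.Dict.getD_of_get?_eq_some (d := last) (d0 := 0) hj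
        omega
      constructor
      · intro h; exact absurd h (by simp)
      · intro h
        have hv := h v0
        rw [hj, pvIdxs_cons_self] at hv
        simp only [pvChain, Bool.and_eq_true, decide_eq_true_eq] at hv
        omega
    · rw [if_neg hbad]
      rw [ih (last.insert v0 i0)]
      constructor
      · intro h v
        rcases eq_or_ne v v0 with rfl | hne
        · have hrest := h v
          rw [PySem.Dict.get?_insert_self] at hrest
          rw [pvIdxs_cons_self]
          cases hg : last.get? v with
          | none => simpa [pvChain] using hrest
          | some j =>
            have hc : last.contains v = true := by
              rw [PySem.Dict.contains_eq_isSome_get?, hg]; rfl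
            have hle : j ≤ i0 := by
              have := PySem.Dict.getD_of_get?_eq_some (d := last) (d0 := 0) hg
              simp only [hc, Bool.true_and, decide_eq_true_eq] at hbad
              omega
            simp [pvChain, hle, hrest]
        · have hrest := h v
          rw [PySem.Dict.get?_insert_of_ne last i0 hne] at hrest
          rw [pvIdxs_cons_ne i0 rest hne.symm]
          exact hrest
      · intro h v
        rcases eq_or_ne v v0 with rfl | hne
        · have hfull := h v
          rw [pvIdxs_cons_self] at hfull
          rw [PySem.Dict.get?_insert_self]
          cases hg : last.get? v with
          | none => rw [hg] at hfull; simpa [pvChain] using hfull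
          | some j =>
            rw [hg] at hfull
            simp only [pvChain, Bool.and_eq_true] at hfull
            exact hfull.2
        · have hfull := h v
          rw [pvIdxs_cons_ne i0 rest hne.symm] at hfull
          rw [PySem.Dict.get?_insert_of_ne last i0 hne]
          exact hfull

-- A's per-group adjacent-pairs scan over range(len-1), rewritten as IsChain
theorem pvScanA_iff (l : List Int) :
    ((PySem.List.pyRange 0 ((l.length : Int) - 1) 1).all (fun i =>
      decide (PySem.List.pyGetD l i 0 ≤ PySem.List.pyGetD l (i + 1) 0))) = true ↔
    List.IsChain (· ≤ ·) l := by
  rw [List.all_eq_true]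
  simp only [decide_eq_true_eq]
  rw [List.isChain_iff_getElem]
  constructor
  · intro h n hn
    have hmem : (n : Int) ∈ PySem.List.pyRange 0 ((l.length : Int) - 1) 1 := by
      rw [PySem.List.mem_pyRange_one]; omega
    have := h _ hmem
    rw [PySem.List.pyGetD_eq_getElem l 0 (by omega) (by omega),
        PySem.List.pyGetD_eq_getElem l 0 (by omega) (by omega)] at this
    exact this
  · intro h i hmem
    rw [PySem.List.mem_pyRange_one] at hmem
    have hn : i.toNat + 1 < l.length := by omega
    have := h i.toNat hn
    rw [PySem.List.pyGetD_eq_getElem l 0 (by omega) (by omega),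
        PySem.List.pyGetD_eq_getElem l 0 (by omega) (by omega)]
    convert this using 2; omega

theorem check_stability_iff (xs : List (Int × Int)) :
    check_stability xs = true ↔ ∀ v : Int, List.IsChain (· ≤ ·) (pvIdxs v xs) := by
  have hA : check_stability xs =
      (xs.foldl (fun d p => d.modify p.1 [] (fun l => l ++ [p.2])) PySem.Dict.empty).values.all
        (fun indices => (PySem.List.pyRange 0 ((indices.length : Int) - 1) 1).all (fun i =>
          decide (PySem.List.pyGetD indices i 0 ≤ PySem.List.pyGetD indices (i + 1) 0))) := rfl
  rw [hA]
  set groups : PySem.Dict Int (List Int) :=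
    xs.foldl (fun d p => d.modify p.1 [] (fun l => l ++ [p.2])) PySem.Dict.empty with hg
  have hnd : groups.keys.Nodup := by
    rw [hg]
    exact PySem.Dict.nodup_keys_foldl_modify_key xs (·.1) [] _ PySem.Dict.empty
      (by simp [PySem.Dict.keys_empty])
  have hkeys : groups.keys = PySem.Set.ofList (xs.map (·.1)) := by
    rw [hg, PySem.Dict.keys_foldl_modify_key]
    simp [PySem.Set.update_nil_left, PySem.Dict.keys_empty]
  have hgetD : ∀ v : Int, groups.getD v [] = pvIdxs v xs := by
    intro v
    rw [hg, PySem.Dict.getD_foldl_modify_append]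
    simp [pvIdxs, PySem.Dict.getD_empty]
  rw [PySem.Dict.values_eq_map_keys groups hnd []]
  rw [List.all_eq_true]
  constructor
  · intro h v
    by_cases hv : v ∈ xs.map (·.1)
    · have hmem : groups.getD v [] ∈ groups.keys.map (fun k => groups.getD k []) :=
        List.mem_map.mpr ⟨v, by rw [hkeys]; exact (PySem.Set.mem_ofList _ _).mpr hv, rfl⟩
      have := h _ hmem
      rw [pvScanA_iff] at this
      rwa [hgetD v] at this
    · rw [pvIdxs_of_not_mem v xs hv]; simp
  · intro h l hl
    obtain ⟨k, _, rfl⟩ := List.mem_map.mp hl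
    rw [pvScanA_iff, hgetD k]
    exact h k

-- ===== VERDICT (by name: the statement is the Claim_ definition above) =====
theorem check_stability_spec : Claim_equal_check_stability := by
  intro xs _
  unfold Spec_check_stability
  rw [Bool.eq_iff_iff, check_stability_iff]
  unfold check_stability_alt
  rw [checkStabilityGo_eq]
  constructor
  · intro h v
    rw [PySem.Dict.get?_empty, pvChain_none_iff]
    exact h v
  · intro h v
    have := h v
    rwa [PySem.Dict.get?_empty, pvChain_none_iff] at this
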